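-- pv_equiv track=rewrite | github.com/mgribov/pf_analyzer | pf_analyzer/parser.py | _expand_once
-- ===== SOURCE A (Python) =====
-- def _expand_once(text: str, macro_map: dict[str, str], line_num: int) -> str:
--     """Single pass of macro substitution."""
--     result: list[str] = []
--     i = 0
--     while i < len(text):
--         if text[i] == '"':
--             # skip quoted string
--             j = i + 1
--             while j < len(text) and text[j] != '"':
--                 j += 1
--             result.append(text[i:j+1])
--             i = j + 1
--         elif text[i] == '$':
--             # read macro name
--             j = i + 1
--             while j < len(text) and (text[j].isalnum() or text[j] == '_'):
--                 j += 1
--             name = text[i+1:j]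
--             if name in macro_map:
--                 result.append(macro_map[name])
--             else:
--                 # unknown macro - keep as-is (may be resolved later)
--                 result.append(text[i:j])
--             i = j
--         else:
--             result.append(text[i])
--             i += 1
--     return "".join(result)
-- ===== SOURCE B (Python) =====
-- import re
--
-- # One regex alternation does the scanning: a quoted string (possibly unterminated),
-- # a $-macro reference, or any single character (including newlines).
-- _TOKEN = re.compile(r'"[^"]*"?|\$[0-9A-Za-z_]*|[\s\S]')
--
--
-- def _expand_once(text: str, macro_map: dict[str, str], line_num: int) -> str:
--     """Single pass of macro substitution via one regex pass."""
--     def repl(m: "re.Match[str]") -> str: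
--         tok = m.group(0)
--         if tok.startswith('$'):
--             name = tok[1:]
--             if name in macro_map:
--                 return macro_map[name]
--         return tok
--     return _TOKEN.sub(repl, text)
-- ===== Notes on version B (the rewrite author's own statement) =====
-- stated objective: idiomatic
-- what changed: Replaced the hand-written index/while scanning loop with a single re.sub over one regex alternation (quoted string | $-name | any char) whose replacement callback substitutes known macros.
import Mathlib
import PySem

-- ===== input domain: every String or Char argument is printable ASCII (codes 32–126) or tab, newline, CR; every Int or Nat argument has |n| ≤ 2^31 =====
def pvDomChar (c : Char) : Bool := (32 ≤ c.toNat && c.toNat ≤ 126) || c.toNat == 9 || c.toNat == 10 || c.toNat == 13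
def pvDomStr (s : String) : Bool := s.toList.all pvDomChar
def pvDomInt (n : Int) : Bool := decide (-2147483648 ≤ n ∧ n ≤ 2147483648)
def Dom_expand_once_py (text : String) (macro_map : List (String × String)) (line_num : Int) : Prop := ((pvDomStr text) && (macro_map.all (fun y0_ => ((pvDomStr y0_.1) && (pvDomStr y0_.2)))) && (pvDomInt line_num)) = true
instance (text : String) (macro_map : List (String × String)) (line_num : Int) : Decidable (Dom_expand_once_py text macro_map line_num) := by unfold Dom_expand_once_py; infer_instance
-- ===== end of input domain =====

-- B replaces A's manual index/while scanning loop by one regex-alternation pass (re.sub with a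
-- replacement callback); equivalence of the return values is proved on the ASCII domain above.

-- ===== PORT A =====
-- text[j].isalnum() or text[j] == '_'
def pvIsWordA (c : Char) : Bool := PySem.Chars.isalnum c || c == '_'

-- inner while loop: j += 1 while j < len(text) and text[j] != '"'
def pvScanQuoteA (cs : List Char) (j : Nat) : Nat :=
  if h : j < cs.length then
    if cs[j] ≠ '"' then pvScanQuoteA cs (j + 1) else j
  else j
termination_by cs.length - j

-- inner while loop: j += 1 while j < len(text) and (text[j].isalnum() or text[j] == '_')
def pvScanNameA (cs : List Char) (j : Nat) : Nat :=
  if h : j < cs.length then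
    if pvIsWordA cs[j] then pvScanNameA cs (j + 1) else j
  else j
termination_by cs.length - j

theorem pvScanQuoteA_ge (cs : List Char) (j : Nat) : j ≤ pvScanQuoteA cs j := by
  fun_induction pvScanQuoteA cs j <;> omega

theorem pvScanNameA_ge (cs : List Char) (j : Nat) : j ≤ pvScanNameA cs j := by
  fun_induction pvScanNameA cs j <;> omega

-- the main while loop over index i with accumulator `result`
def pvLoopA (cs : List Char) (mm : List (String × String)) (i : Nat) (res : List String) :
    List String :=
  if h : i < cs.length then
    if cs[i] = '"' then
      let j := pvScanQuoteA cs (i + 1)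
      pvLoopA cs mm (j + 1)
        (res ++ [String.mk (PySem.List.slice cs (some (i : Int)) (some ((j : Int) + 1)))])
    else if cs[i] = '$' then
      let j := pvScanNameA cs (i + 1)
      let name := String.mk (PySem.List.slice cs (some ((i : Int) + 1)) (some (j : Int)))
      match (PySem.Dict.mk mm).get? name with
      | some v => pvLoopA cs mm j (res ++ [v])
      | none =>
          pvLoopA cs mm j
            (res ++ [String.mk (PySem.List.slice cs (some (i : Int)) (some (j : Int)))])
    else
      pvLoopA cs mm (i + 1) (res ++ [String.mk [cs[i]]])
  else res
termination_by cs.length - i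
decreasing_by
  · have := pvScanQuoteA_ge cs (i + 1); omega
  · have := pvScanNameA_ge cs (i + 1); omega
  · have := pvScanNameA_ge cs (i + 1); omega
  · omega

def expand_once_py (text : String) (macro_map : List (String × String)) (line_num : Int) :
    String :=
  PySem.Str.join "" (pvLoopA text.toList macro_map 0 [])

-- ===== PORT B =====
-- the regex class [0-9A-Za-z_] (hand-ported; exact for this pattern)
def pvWordB (c : Char) : Bool :=
  (decide ('0' ≤ c) && decide (c ≤ '9')) || (decide ('A' ≤ c) && decide (c ≤ 'Z')) ||
    (decide ('a' ≤ c) && decide (c ≤ 'z')) || c == '_'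

-- the regex alternation r'"[^"]*"?|\$[0-9A-Za-z_]*|[\s\S]' applied repeatedly from the left,
-- as re.sub scans (hand-ported, step for step; exact for this pattern: some branch always
-- matches, so the matches tile the string)
def pvTokensB : List Char → List (List Char)
  | [] => []
  | '"' :: rest =>
      ('"' :: rest.takeWhile (fun c => c ≠ '"') ++ (rest.dropWhile (fun c => c ≠ '"')).take 1) ::
        pvTokensB ((rest.dropWhile (fun c => c ≠ '"')).drop 1)
  | '$' :: rest => ('$' :: rest.takeWhile pvWordB) :: pvTokensB (rest.dropWhile pvWordB)
  | c :: rest => [c] :: pvTokensB rest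
termination_by t => t.length
decreasing_by
  · have := List.length_dropWhile_le (fun c => c ≠ '"') rest
    simp only [List.length_drop, List.length_cons]; omega
  · have := List.length_dropWhile_le pvWordB rest
    simp only [List.length_cons]; omega
  · simp

-- the replacement callback `repl`
def pvReplB (mm : List (String × String)) : List Char → String
  | '$' :: nm =>
      match (PySem.Dict.mk mm).get? (String.mk nm) with
      | some v => v
      | none => String.mk ('$' :: nm)
  | t => String.mk t

def expand_once_py_alt (text : String) (macro_map : List (String × String)) (line_num : Int) :
    String :=
  PySem.Str.join "" ((pvTokensB text.toList).map (pvReplB macro_map))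

-- ===== PRECONDITION & SPEC =====
def Spec_expand_once_py (text : String) (macro_map : List (String × String)) (line_num : Int) (out : String) : Prop := out = expand_once_py_alt text macro_map line_num
instance (text : String) (macro_map : List (String × String)) (line_num : Int) (out : String) : Decidable (Spec_expand_once_py text macro_map line_num out) := by unfold Spec_expand_once_py; infer_instance

-- ===== CLAIM (what is proved, stated in full; the proofs are below) =====
def Claim_equal_expand_once_py : Prop := ∀ (text : String) (macro_map : List (String × String)) (line_num : Int), Dom_expand_once_py text macro_map line_num → Spec_expand_once_py text macro_map line_num (expand_once_py text macro_map line_num)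

-- ===== LEMMAS AND PROOFS =====

theorem pvWord_eq : pvIsWordA = pvWordB := by
  funext c
  simp only [pvIsWordA, pvWordB, PySem.Chars.isalnum, PySem.Chars.isalpha, PySem.Chars.isupper,
    PySem.Chars.islower, PySem.Chars.isdigit]
  ac_rfl

theorem pvDropWhile_eq_drop {α : Type} (p : α → Bool) (l : List α) :
    l.dropWhile p = l.drop (l.takeWhile p).length := by
  induction l with
  | nil => rfl
  | cons a l ih =>
      by_cases h : p a = true <;> simp [h, ih]

theorem pvScanQuoteA_eq (cs : List Char) (j : Nat) :
    pvScanQuoteA cs j = j + ((cs.drop j).takeWhile (fun c => c ≠ '"')).length := by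
  fun_induction pvScanQuoteA cs j with
  | case1 j h hne ih =>
      rw [ih, List.drop_eq_getElem_cons h, List.takeWhile_cons]; simp [hne]; omega
  | case2 j h hne =>
      rw [List.drop_eq_getElem_cons h, List.takeWhile_cons]; simp at hne; simp [hne]
  | case3 j h => rw [List.drop_eq_nil_of_le (by omega)]; simp

theorem pvScanNameA_eq (cs : List Char) (j : Nat) :
    pvScanNameA cs j = j + ((cs.drop j).takeWhile pvWordB).length := by
  fun_induction pvScanNameA cs j with
  | case1 j h hw ih =>
      rw [pvWord_eq] at hw
      rw [ih, List.drop_eq_getElem_cons h, List.takeWhile_cons]; simp [hw]; omega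
  | case2 j h hw =>
      rw [pvWord_eq] at hw
      rw [List.drop_eq_getElem_cons h, List.takeWhile_cons]; simp [hw]
  | case3 j h => rw [List.drop_eq_nil_of_le (by omega)]; simp

theorem pvTakePrefix {α : Type} (p : α → Bool) (l : List α) :
    l.take (l.takeWhile p).length = l.takeWhile p := by
  exact (List.prefix_iff_eq_take.mp (List.takeWhile_prefix p)).symm

theorem pvTokensB_quote (cs : List Char) (i : Nat) (h : i < cs.length) (hq : cs[i] = '"') :
    pvTokensB (cs.drop i) =
      ('"' :: (cs.drop (i+1)).takeWhile (fun c => c ≠ '"') ++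
          ((cs.drop (i+1)).dropWhile (fun c => c ≠ '"')).take 1) ::
        pvTokensB (((cs.drop (i+1)).dropWhile (fun c => c ≠ '"')).drop 1) := by
  rw [List.drop_eq_getElem_cons h, hq, pvTokensB]

theorem pvTokensB_dollar (cs : List Char) (i : Nat) (h : i < cs.length) (hq : cs[i] = '$') :
    pvTokensB (cs.drop i) =
      ('$' :: (cs.drop (i+1)).takeWhile pvWordB) ::
        pvTokensB ((cs.drop (i+1)).dropWhile pvWordB) := by
  rw [List.drop_eq_getElem_cons h, hq, pvTokensB]

theorem pvTokensB_plain (c : Char) (rest : List Char)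
    (h1 : ¬ c = '"') (h2 : ¬ c = '$') :
    pvTokensB (c :: rest) = [c] :: pvTokensB rest := by
  rw [pvTokensB.eq_def]
  split <;> simp_all

theorem pvReplB_plain (mm : List (String × String)) (c : Char) (h : ¬ c = '$') :
    pvReplB mm [c] = String.mk [c] := by
  rw [pvReplB.eq_def]
  split <;> simp_all

theorem pvLoopA_eq (cs : List Char) (mm : List (String × String)) (i : Nat) (res : List String) :
    pvLoopA cs mm i res = res ++ (pvTokensB (cs.drop i)).map (pvReplB mm) := by
  fun_induction pvLoopA cs mm i res with
  | case1 i res h hq j ih =>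
      have hj : j = (i+1) + ((cs.drop (i+1)).takeWhile (fun c => c ≠ '"')).length :=
        pvScanQuoteA_eq cs (i+1)
      set tw := (cs.drop (i+1)).takeWhile (fun c => c ≠ '"') with htw
      set dw := (cs.drop (i+1)).dropWhile (fun c => c ≠ '"') with hdw
      have htd : tw ++ dw = cs.drop (i+1) := List.takeWhile_append_dropWhile
      have hslice : PySem.List.slice cs (some (i : Int)) (some ((j : Int) + 1)) =
          '"' :: tw ++ dw.take 1 := by
        have : ((j : Int) + 1) = ((j + 1 : Nat) : Int) := by push_cast; ring
        rw [this, PySem.List.slice_natCast, List.drop_eq_getElem_cons h, hq]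
        have hn : j + 1 - i = tw.length + 2 := by omega
        rw [hn]
        have : (cs.drop (i+1)).take (tw.length + 1) = tw ++ dw.take 1 := by
          rw [← htd]; exact List.take_length_add_append 1
        simp [List.take_succ_cons, this]
      have hdrop : cs.drop (j + 1) = dw.drop 1 := by
        have h1 : cs.drop (j+1) = (cs.drop (i+1)).drop (tw.length + 1) := by
          rw [List.drop_drop]
          congr 1
          omega
        rw [h1, ← List.drop_drop, ← pvDropWhile_eq_drop]
      rw [ih, hdrop, pvTokensB_quote cs i h hq, ← htw, ← hdw, hslice]
      simp [pvReplB]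
  | case2 i res h hq hd j name v hv ih =>
      have hj : j = (i+1) + ((cs.drop (i+1)).takeWhile pvWordB).length := pvScanNameA_eq cs (i+1)
      set nm := (cs.drop (i+1)).takeWhile pvWordB with hnm
      have hname : name = String.mk nm := by
        show String.mk (PySem.List.slice cs (some ((i:Int)+1)) (some (j:Int))) = _
        have : ((i : Int) + 1) = ((i + 1 : Nat) : Int) := by push_cast; ring
        rw [this, PySem.List.slice_natCast]
        have hn : j - (i+1) = nm.length := by omega
        rw [hn, hnm, pvTakePrefix]
      have hdrop : cs.drop j = (cs.drop (i+1)).dropWhile pvWordB := by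
        have h1 : cs.drop j = (cs.drop (i+1)).drop nm.length := by
          rw [List.drop_drop, hj]
        rw [h1, ← pvDropWhile_eq_drop]
      rw [ih, hdrop, pvTokensB_dollar cs i h hd]
      rw [hname] at hv
      simp [pvReplB, ← hnm, hv]
  | case3 i res h hq hd j name hv ih =>
      have hj : j = (i+1) + ((cs.drop (i+1)).takeWhile pvWordB).length := pvScanNameA_eq cs (i+1)
      set nm := (cs.drop (i+1)).takeWhile pvWordB with hnm
      have hname : name = String.mk nm := by
        show String.mk (PySem.List.slice cs (some ((i:Int)+1)) (some (j:Int))) = _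
        have : ((i : Int) + 1) = ((i + 1 : Nat) : Int) := by push_cast; ring
        rw [this, PySem.List.slice_natCast]
        have hn : j - (i+1) = nm.length := by omega
        rw [hn, hnm, pvTakePrefix]
      have hslice : PySem.List.slice cs (some (i : Int)) (some (j : Int)) = '$' :: nm := by
        rw [PySem.List.slice_natCast, List.drop_eq_getElem_cons h, hd]
        have hn : j - i = nm.length + 1 := by omega
        rw [hn]
        simp [List.take_succ_cons, hnm, pvTakePrefix]
      have hdrop : cs.drop j = (cs.drop (i+1)).dropWhile pvWordB := by
        have h1 : cs.drop j = (cs.drop (i+1)).drop nm.length := by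
          rw [List.drop_drop, hj]
        rw [h1, ← pvDropWhile_eq_drop]
      rw [ih, hdrop, pvTokensB_dollar cs i h hd, hslice]
      rw [hname] at hv
      simp [pvReplB, ← hnm, hv]
  | case4 i res h hq hd ih =>
      rw [ih, List.drop_eq_getElem_cons h, pvTokensB_plain cs[i] (cs.drop (i+1)) hq hd]
      simp [pvReplB_plain mm cs[i] hd]
  | case5 i res h =>
      rw [List.drop_eq_nil_of_le (by omega)]
      simp [pvTokensB]

-- ===== VERDICT (by name: the statement is the Claim_ definition above) =====
theorem expand_once_py_spec : Claim_equal_expand_once_py := by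
  intro text mm ln _
  unfold Spec_expand_once_py expand_once_py expand_once_py_alt
  rw [pvLoopA_eq]
  simp
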